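-- pv_equiv track=rewrite | github.com/Mozartismee/mcsr-lsc-pb | metrics/lsc_pb.py | normalize_trace_via_L
-- ===== SOURCE A (Python) =====
-- from typing import List, Dict, Tuple
--
-- def normalize_trace_via_L(trace: List[str], L_map: Dict[str, str]) -> List[str]:
--     """Map tokens in a step-level trace into L; unknown tokens pass through."""
--     out = []
--     for step in trace:
--         # very toy: split on non-alphas, map word-by-word
--         tokens = []
--         buf = []
--         for ch in step:
--             if ch.isalpha():
--                 buf.append(ch.lower())
--             else:
--                 if buf:
--                     tokens.append(''.join(buf)); buf=[]
--         if buf: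
--             tokens.append(''.join(buf))
--         mapped = [L_map.get(tok, tok) for tok in tokens]
--         out.append(' '.join(mapped))
--     return out
-- ===== SOURCE B (Python) =====
-- def normalize_trace_via_L(trace, L_map):
--     """Map tokens in a step-level trace into L; unknown tokens pass through.
--
--     Two-pointer run scanner: skip non-alpha chars, slice out each maximal
--     alphabetic run, lowercase it as a whole, and map it through L_map.
--     """
--     out = []
--     for step in trace:
--         mapped = []
--         i, n = 0, len(step)
--         while i < n:
--             if not step[i].isalpha():
--                 i += 1
--                 continue
--             j = i + 1
--             while j < n and step[j].isalpha():
--                 j += 1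
--             tok = step[i:j].lower()
--             mapped.append(L_map.get(tok, tok))
--             i = j
--         out.append(' '.join(mapped))
--     return out
-- ===== Notes on version B (the rewrite author's own statement) =====
-- stated objective: alternative
-- what changed: Replaced A's per-character buffer/flush state machine with a two-pointer run scanner that skips non-alphabetic characters, slices out each maximal alphabetic run, lowercases it as a whole, and maps it through L_map.
import Mathlib
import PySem

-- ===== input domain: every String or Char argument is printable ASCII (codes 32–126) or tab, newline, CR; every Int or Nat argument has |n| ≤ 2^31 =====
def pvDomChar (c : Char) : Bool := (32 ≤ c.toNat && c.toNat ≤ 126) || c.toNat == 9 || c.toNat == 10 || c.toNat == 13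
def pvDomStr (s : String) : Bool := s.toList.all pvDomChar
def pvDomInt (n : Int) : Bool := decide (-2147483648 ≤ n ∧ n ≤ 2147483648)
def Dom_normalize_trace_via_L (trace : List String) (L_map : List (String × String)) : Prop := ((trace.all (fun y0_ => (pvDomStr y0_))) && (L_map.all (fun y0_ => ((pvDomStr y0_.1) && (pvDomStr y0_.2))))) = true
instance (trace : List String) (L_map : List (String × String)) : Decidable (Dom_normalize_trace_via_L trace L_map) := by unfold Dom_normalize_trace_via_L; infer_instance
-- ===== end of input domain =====

-- B replaces A's per-char buffer/flush state machine with a two-pointer run scanner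
-- (skip non-alpha, slice out each maximal alpha run, lower it whole); objective: alternative.

-- ===== PORT A =====
-- inner for-loop over the step's chars with state (tokens, buf)
def pvStepA (st : List String × List Char) (ch : Char) : List String × List Char :=
  if PySem.Chars.isalpha ch then (st.1, st.2 ++ [PySem.Chars.lowerChar ch])
  else if st.2 ≠ [] then (st.1 ++ [String.ofList st.2], []) else st

def pvTokensA (step : List Char) : List String :=
  let tb := step.foldl pvStepA ([], [])
  if tb.2 ≠ [] then tb.1 ++ [String.ofList tb.2] else tb.1

def normalize_trace_via_L (trace : List String) (L_map : List (String × String)) : List String :=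
  trace.foldl (fun out step =>
    let tokens := pvTokensA step.toList
    let mapped := tokens.map (fun tok => (PySem.Dict.ofList L_map).getD tok tok)
    out ++ [PySem.Str.join " " mapped]) []

-- ===== PORT B =====
-- the inner 'while j < n and step[j].isalpha(): j += 1' loop: the maximal alpha run and the rest
def pvSpanAlpha : List Char → List Char × List Char
  | [] => ([], [])
  | c :: cs => if PySem.Chars.isalpha c then
      let p := pvSpanAlpha cs; (c :: p.1, p.2)
    else ([], c :: cs)

theorem pvSpanAlpha_len : ∀ cs : List Char, (pvSpanAlpha cs).2.length ≤ cs.length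
  | [] => Nat.le_refl _
  | c :: cs => by
    simp only [pvSpanAlpha]
    split
    · exact Nat.le_succ_of_le (pvSpanAlpha_len cs)
    · exact Nat.le_refl _

-- the outer 'while i < n' loop of B: skip a non-alpha char, or emit a lowered run
def pvTokensB : List Char → List String
  | [] => []
  | c :: cs =>
    if PySem.Chars.isalpha c then
      String.ofList (PySem.Chars.lower (c :: (pvSpanAlpha cs).1)) :: pvTokensB (pvSpanAlpha cs).2
    else pvTokensB cs
termination_by cs => cs.length
decreasing_by
  · exact Nat.lt_succ_of_le (pvSpanAlpha_len cs)
  · exact Nat.lt_succ_self _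

def normalize_trace_via_L_alt (trace : List String) (L_map : List (String × String)) : List String :=
  trace.foldl (fun out step =>
    let mapped := (pvTokensB step.toList).map (fun tok => (PySem.Dict.ofList L_map).getD tok tok)
    out ++ [PySem.Str.join " " mapped]) []

-- ===== PRECONDITION & SPEC =====
def Spec_normalize_trace_via_L (trace : List String) (L_map : List (String × String)) (out : List String) : Prop := out = normalize_trace_via_L_alt trace L_map
instance (trace : List String) (L_map : List (String × String)) (out : List String) : Decidable (Spec_normalize_trace_via_L trace L_map out) := by unfold Spec_normalize_trace_via_L; infer_instance

-- ===== CLAIM (what is proved, stated in full; the proofs are below) =====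
def Claim_equal_normalize_trace_via_L : Prop := ∀ (trace : List String) (L_map : List (String × String)), Dom_normalize_trace_via_L trace L_map → Spec_normalize_trace_via_L trace L_map (normalize_trace_via_L trace L_map)

-- ===== LEMMAS AND PROOFS =====

-- intermediate spec: tokens still to be produced when 'buf' (already lowered) is pending
def pvG : List Char → List Char → List String
  | buf, [] => if buf = [] then [] else [String.ofList buf]
  | buf, c :: cs =>
    if PySem.Chars.isalpha c then pvG (buf ++ [PySem.Chars.lowerChar c]) cs
    else if buf = [] then pvG [] cs else String.ofList buf :: pvG [] cs

theorem foldA_eq_pvG : ∀ (cs : List Char) (tokens : List String) (buf : List Char),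
    (let tb := cs.foldl pvStepA (tokens, buf);
     if tb.2 ≠ [] then tb.1 ++ [String.ofList tb.2] else tb.1) = tokens ++ pvG buf cs := by
  intro cs
  induction cs with
  | nil =>
    intro tokens buf
    simp only [List.foldl_nil, pvG]
    by_cases h : buf = [] <;> simp [h]
  | cons c cs ih =>
    intro tokens buf
    simp only [List.foldl_cons, pvG, pvStepA]
    by_cases ha : PySem.Chars.isalpha c
    · simpa [ha] using ih tokens (buf ++ [PySem.Chars.lowerChar c])
    · by_cases hb : buf = []
      · simpa [ha, hb] using ih tokens []
      · have h := ih (tokens ++ [String.ofList buf]) []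
        simp only [ha, hb, Bool.false_eq_true, if_false, ne_eq, not_false_eq_true,
          if_pos] at h ⊢
        rw [h]
        simp

theorem pvG_eq_tokensB : ∀ (n : ℕ) (cs : List Char), cs.length ≤ n →
    (pvG [] cs = pvTokensB cs ∧
     ∀ buf : List Char, buf ≠ [] →
       pvG buf cs = String.ofList (buf ++ (pvSpanAlpha cs).1.map PySem.Chars.lowerChar)
            :: pvTokensB (pvSpanAlpha cs).2) := by
  intro n
  induction n with
  | zero =>
    intro cs hcs
    have : cs = [] := List.eq_nil_of_length_eq_zero (Nat.le_zero.mp hcs)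
    subst this
    exact ⟨by simp [pvG, pvTokensB], fun buf hb => by simp [pvG, pvSpanAlpha, pvTokensB, hb]⟩
  | succ n ih =>
    intro cs hcs
    match cs with
    | [] =>
      exact ⟨by simp [pvG, pvTokensB], fun buf hb => by simp [pvG, pvSpanAlpha, pvTokensB, hb]⟩
    | c :: cs' =>
      have hlen : cs'.length ≤ n := Nat.le_of_succ_le_succ hcs
      have hspan : (pvSpanAlpha cs').2.length ≤ n :=
        Nat.le_trans (pvSpanAlpha_len cs') hlen
      constructor
      · by_cases ha : PySem.Chars.isalpha c
        · have h2 := (ih cs' hlen).2 [PySem.Chars.lowerChar c] (by simp)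
          simp only [pvG, ha, if_pos, List.nil_append] at h2 ⊢
          rw [h2]
          simp [pvTokensB, ha, PySem.Chars.lower]
        · have h1 := (ih cs' hlen).1
          simp only [pvG, ha, Bool.false_eq_true, if_false, if_pos]
          rw [h1]
          simp [pvTokensB, ha]
      · intro buf hb
        by_cases ha : PySem.Chars.isalpha c
        · have h2 := (ih cs' hlen).2 (buf ++ [PySem.Chars.lowerChar c]) (by simp)
          simp only [pvG, ha, if_pos] at h2 ⊢
          rw [h2]
          simp [pvSpanAlpha, ha, List.append_assoc]
        · have h1 := (ih cs' hlen).1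
          simp only [pvG, ha, hb, Bool.false_eq_true, if_false]
          rw [h1]
          simp [pvSpanAlpha, ha, pvTokensB]

theorem tokensA_eq_tokensB (cs : List Char) : pvTokensA cs = pvTokensB cs := by
  have h := foldA_eq_pvG cs [] []
  simp only [List.nil_append] at h
  rw [pvTokensA, h]
  exact (pvG_eq_tokensB cs.length cs (Nat.le_refl _)).1

-- ===== VERDICT (by name: the statement is the Claim_ definition above) =====
theorem normalize_trace_via_L_spec : Claim_equal_normalize_trace_via_L := by
  intro trace L_map _
  unfold Spec_normalize_trace_via_L normalize_trace_via_L normalize_trace_via_L_alt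
  congr 1
  funext out step
  rw [tokensA_eq_tokensB]
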